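-- pv_equiv track=rewrite | github.com/mariene/3I005 | Entropie_etc/Entropie.py | DicoToList_bis
-- ===== SOURCE A (Python) =====
-- import string
--
-- def DicoToList_bis(dico):  #@param dico est le dictionnaire de DicoToDicoProba
-- #la meme chose avec DicoToList, seule difference: on renvoie une liste dans l'ordre alphabetique
--     liste = []
--     alphabet = list(string.ascii_lowercase)
--     for i in range(len(alphabet)):
--         for cle in dico:
--             if (cle == alphabet[i]):
--                 liste.append(dico[cle])
--     return liste
-- ===== SOURCE B (Python) =====
-- import string
--
-- def DicoToList_bis(dico):
--     # One pass over the dict: drop each value of a single lowercase-letter key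
--     # into its alphabet slot, then read the 26 slots off in order.
--     slots = [None] * 26
--     for k, v in dico.items():
--         if len(k) == 1 and 'a' <= k <= 'z':
--             slots[ord(k) - 97] = v
--     return [v for v in slots if v is not None]
-- ===== Notes on version B (the rewrite author's own statement) =====
-- stated objective: faster
-- what changed: Instead of scanning the whole dict once per alphabet letter (26 passes), B makes a single pass over the dict, bucketing each single-lowercase-letter key's value into a 26-slot array, then reads the slots off in order.
import Mathlib
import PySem

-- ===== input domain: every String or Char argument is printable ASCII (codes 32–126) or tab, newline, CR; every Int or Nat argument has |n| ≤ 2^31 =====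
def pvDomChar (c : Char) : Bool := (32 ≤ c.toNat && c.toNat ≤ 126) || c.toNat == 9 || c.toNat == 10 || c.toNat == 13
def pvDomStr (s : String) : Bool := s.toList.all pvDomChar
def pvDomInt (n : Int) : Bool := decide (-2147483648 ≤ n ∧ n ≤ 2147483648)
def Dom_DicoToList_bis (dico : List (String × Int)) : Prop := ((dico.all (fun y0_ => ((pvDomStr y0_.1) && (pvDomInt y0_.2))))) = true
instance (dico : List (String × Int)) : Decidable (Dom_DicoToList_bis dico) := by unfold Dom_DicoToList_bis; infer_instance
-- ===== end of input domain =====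

-- B replaces A's 26 repeated scans of the dict by a single pass that drops each value of a
-- single-lowercase-letter key into a 26-slot bucket array read off in alphabet order.

-- ===== PORT A =====
-- dico[cle]: first-match association-list lookup; cle always comes from dico's keys here,
-- so the default is never reached
def pyLookup (dico : List (String × Int)) (cle : String) : Int :=
  ((dico.find? (fun kv => kv.1 == cle)).map (·.2)).getD 0

def DicoToList_bis (dico : List (String × Int)) : List Int :=
  let alphabet : List String := "abcdefghijklmnopqrstuvwxyz".toList.map (fun c => String.ofList [c])
  alphabet.foldl
    (fun liste letter =>
      dico.foldl
        (fun liste kv => if kv.1 == letter then liste ++ [pyLookup dico kv.1] else liste)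
        liste)
    []

-- ===== PORT B =====
-- len(k) == 1 and 'a' <= k <= 'z', and then ord(k) - 97 (exact for single-char strings)
def letterIdx (k : String) : Option Nat :=
  match k.toList with
  | [c] => if 'a' ≤ c ∧ c ≤ 'z' then some (c.toNat - 97) else none
  | _ => none

def DicoToList_bis_alt (dico : List (String × Int)) : List Int :=
  (dico.foldl
      (fun slots kv =>
        match letterIdx kv.1 with
        | some i => slots.set i (some kv.2)
        | none => slots)
      (List.replicate 26 (none : Option Int))).filterMap id

-- ===== PRECONDITION & SPEC =====
-- Pre_ excludes association lists with duplicate keys: A's argument is a Python dict, whose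
-- keys are unique, so such lists do not correspond to any input A is ever called on.
def Pre_DicoToList_bis (dico : List (String × Int)) : Prop :=
  (dico.map Prod.fst).Nodup
instance (dico : List (String × Int)) : Decidable (Pre_DicoToList_bis dico) := by
  unfold Pre_DicoToList_bis; infer_instance

def pvWitness_DicoToList_bis : (List (String × Int)) := [("b", 2), ("a", -1), ("zz", 7), ("B", 0)]

def Spec_DicoToList_bis (dico : List (String × Int)) (out : List Int) : Prop := out = DicoToList_bis_alt dico
instance (dico : List (String × Int)) (out : List Int) : Decidable (Spec_DicoToList_bis dico out) := by unfold Spec_DicoToList_bis; infer_instance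

-- ===== CLAIM (what is proved, stated in full; the proofs are below) =====
def Claim_equal_DicoToList_bis : Prop := ∀ (dico : List (String × Int)), Dom_DicoToList_bis dico → Pre_DicoToList_bis dico → Spec_DicoToList_bis dico (DicoToList_bis dico)

-- ===== LEMMAS AND PROOFS =====

-- the 26 alphabet letters of A, paired with their slot index in B
def pvPairs : List (Nat × Char) := (List.range 26).zip "abcdefghijklmnopqrstuvwxyz".toList

-- value B's slot i holds at the end of its pass
def pvOptval (dico : List (String × Int)) (i : Nat) : Option Int :=
  (dico.reverse.find? (fun kv => letterIdx kv.1 == some i)).map (·.2)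

lemma pv_filterMap_id (xs : List (Option Int)) : xs.filterMap id = xs.flatMap Option.toList := by
  induction xs with
  | nil => rfl
  | cons a t ih => cases a <;> simpa using ih

lemma pv_find?_reverse (l : List (String × Int)) (p : String × Int → Bool)
    (h : (l.filter p).length ≤ 1) : l.reverse.find? p = l.find? p := by
  induction l with
  | nil => rfl
  | cons kv t ih =>
    rw [List.reverse_cons, List.find?_append]
    cases hp : p kv with
    | true =>
      have ht : t.filter p = [] := by
        rw [List.filter_cons_of_pos hp] at h
        rw [List.length_cons] at h
        have : (t.filter p).length = 0 := by omega
        simpa [List.length_eq_zero_iff] using this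
      have hnone : t.reverse.find? p = none := by
        rw [List.find?_eq_none]
        intro x hx
        have : x ∈ t := List.mem_reverse.mp hx
        intro hpx
        have : x ∈ t.filter p := List.mem_filter.mpr ⟨this, hpx⟩
        simp [ht] at this
      simp [hnone, hp]
    | false =>
      have h' : (t.filter p).length ≤ 1 := by
        simpa [List.filter_cons, hp] using h
      simp [ih h', hp]

lemma pv_filter_key_le_one (l : List (String × Int)) (s : String)
    (h : (l.map Prod.fst).Nodup) : (l.filter (fun kv => kv.1 == s)).length ≤ 1 := by
  induction l with
  | nil => simp
  | cons kv t ih =>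
    rw [List.map_cons, List.nodup_cons] at h
    cases hp : (kv.1 == s) with
    | true =>
      have hs : kv.1 = s := beq_iff_eq.mp hp
      have ht : t.filter (fun kv => kv.1 == s) = [] := by
        rw [List.filter_eq_nil_iff]
        intro x hx hpx
        have : x.1 = s := beq_iff_eq.mp hpx
        exact h.1 (by
          rw [List.mem_map]
          exact ⟨x, hx, by rw [this, hs]⟩)
      simp [hp, ht]
    | false =>
      simpa [List.filter_cons, hp] using ih h.2

-- A's inner scan over the keys, under unique keys, is exactly "look the letter up"
lemma pv_block_eq (dico : List (String × Int)) (s : String)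
    (hnd : (dico.map Prod.fst).Nodup) :
    (dico.filter (fun kv => kv.1 == s)).map (fun kv => pyLookup dico kv.1)
      = ((dico.find? (fun kv => kv.1 == s)).map (·.2)).toList := by
  induction dico with
  | nil => rfl
  | cons kv t ih =>
    rw [List.map_cons, List.nodup_cons] at hnd
    cases hp : (kv.1 == s) with
    | true =>
      have hs : kv.1 = s := beq_iff_eq.mp hp
      have ht : t.filter (fun kv => kv.1 == s) = [] := by
        rw [List.filter_eq_nil_iff]
        intro x hx hpx
        have : x.1 = s := beq_iff_eq.mp hpx
        exact hnd.1 (by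
          rw [List.mem_map]
          exact ⟨x, hx, by rw [this, hs]⟩)
      simp [hp, ht, List.find?_cons, pyLookup]
    | false =>
      have hmap : (t.filter (fun kv' => kv'.1 == s)).map (fun kv' => pyLookup (kv :: t) kv'.1)
          = (t.filter (fun kv' => kv'.1 == s)).map (fun kv' => pyLookup t kv'.1) := by
        apply List.map_congr_left
        intro x hx
        have hxs : x.1 = s := beq_iff_eq.mp (List.mem_filter.mp hx).2
        have hne : (kv.1 == x.1) = false := by
          rw [hxs]
          exact hp
        simp [pyLookup, hne]
      simp [hp, hmap, ih hnd.2]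

lemma pv_fold_len (l : List (String × Int)) (slots : List (Option Int)) :
    (l.foldl
        (fun slots kv =>
          match letterIdx kv.1 with
          | some i => slots.set i (some kv.2)
          | none => slots)
        slots).length = slots.length := by
  induction l generalizing slots with
  | nil => rfl
  | cons kv t ih =>
    rw [List.foldl_cons, ih]
    cases letterIdx kv.1 <;> simp

lemma pv_fold_get (l : List (String × Int)) (slots : List (Option Int)) (i : Nat)
    (hi : i < slots.length) :
    (l.foldl
        (fun slots kv =>
          match letterIdx kv.1 with
          | some i => slots.set i (some kv.2)
          | none => slots)
        slots)[i]? =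
      match l.reverse.find? (fun kv => letterIdx kv.1 == some i) with
      | some kv => some (some kv.2)
      | none => slots[i]? := by
  induction l generalizing slots with
  | nil => simp
  | cons kv t ih =>
    rw [List.foldl_cons, List.reverse_cons, List.find?_append]
    have hlen : (match letterIdx kv.1 with
        | some j => slots.set j (some kv.2)
        | none => slots).length = slots.length := by
      cases letterIdx kv.1 <;> simp
    rw [ih _ (by rw [hlen]; exact hi)]
    cases hf : t.reverse.find? (fun kv => letterIdx kv.1 == some i) with
    | some kv' => simp
    | none =>
      simp only [Option.none_or]
      cases hj : letterIdx kv.1 with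
      | none => simp [hj]
      | some j =>
        by_cases hij : j = i
        · subst hij
          simp [hj, hi]
        · simp [hj, hij, List.getElem?_set_ne hij]

lemma pv_B_eq (dico : List (String × Int)) :
    DicoToList_bis_alt dico = (List.range 26).flatMap (fun i => (pvOptval dico i).toList) := by
  unfold DicoToList_bis_alt
  have hfin :
      (dico.foldl
          (fun slots kv =>
            match letterIdx kv.1 with
            | some i => slots.set i (some kv.2)
            | none => slots)
          (List.replicate 26 (none : Option Int)))
        = (List.range 26).map (pvOptval dico) := by
    apply List.ext_getElem?
    intro i
    by_cases hi : i < 26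
    · rw [pv_fold_get dico _ i (by simpa using hi)]
      rw [List.getElem?_map, List.getElem?_range hi, Option.map_some]
      unfold pvOptval
      cases hf : dico.reverse.find? (fun kv => letterIdx kv.1 == some i) with
      | some kv' =>
        try rw [hf]
        all_goals rfl
      | none =>
        try rw [hf]
        rw [List.getElem?_replicate]
        all_goals simp [hi]
    · have h1 : (dico.foldl
          (fun slots kv =>
            match letterIdx kv.1 with
            | some i => slots.set i (some kv.2)
            | none => slots)
          (List.replicate 26 (none : Option Int))).length = 26 := by
        rw [pv_fold_len]; simp
      rw [List.getElem?_eq_none (by rw [h1]; omega),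
          List.getElem?_eq_none (by simpa using Nat.le_of_not_lt hi)]
  rw [hfin, pv_filterMap_id, List.flatMap_map]

lemma pv_A_eq (dico : List (String × Int)) (hnd : (dico.map Prod.fst).Nodup) :
    DicoToList_bis dico
      = ("abcdefghijklmnopqrstuvwxyz".toList.map (fun c => String.ofList [c])).flatMap
          (fun s => ((dico.find? (fun kv => kv.1 == s)).map (·.2)).toList) := by
  unfold DicoToList_bis
  have hfun : (fun (liste : List Int) (letter : String) =>
      dico.foldl
        (fun liste kv => if kv.1 == letter then liste ++ [pyLookup dico kv.1] else liste)
        liste)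
      = fun liste letter =>
        liste ++ ((dico.filter (fun kv => kv.1 == letter)).map (fun kv => pyLookup dico kv.1)) := by
    funext liste letter
    exact PySem.List.foldl_append_if ..
  rw [hfun, PySem.List.foldl_append_eq_flatMap, List.nil_append]
  apply List.flatMap_congr
  intro s _
  exact pv_block_eq dico s hnd

lemma pv_pred_eq (i : Nat) (c : Char) (hc : c.toNat = 97 + i) (hi : i < 26) :
    (fun kv : String × Int => letterIdx kv.1 == some i)
      = (fun kv : String × Int => kv.1 == String.ofList [c]) := by
  funext kv
  have hiff : letterIdx kv.1 = some i ↔ kv.1 = String.ofList [c] := by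
    have hmk : kv.1 = String.ofList [c] ↔ kv.1.toList = [c] := by
      constructor
      · intro h; rw [h]; simp
      · intro h; exact String.ext (by simpa using h)
    rw [hmk]
    cases hk : kv.1.toList with
    | nil => simp [letterIdx, hk]
    | cons c' t =>
      cases t with
      | nil =>
        have hred : letterIdx kv.1
            = if 'a' ≤ c' ∧ c' ≤ 'z' then some (c'.toNat - 97) else none := by
          simp [letterIdx, hk]
        rw [hred]
        by_cases hb : 'a' ≤ c' ∧ c' ≤ 'z'
        · have h1 : (97 : Nat) ≤ c'.toNat := hb.1
          have h2 : c'.toNat ≤ (122 : Nat) := hb.2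
          rw [if_pos hb]
          constructor
          · intro h
            have h3 : c'.toNat - 97 = i := Option.some.inj h
            have h4 : c'.toNat = c.toNat := by omega
            exact congrArg (fun x => [x]) (Char.ext (UInt32.toNat_inj.mp h4))
          · intro h
            have hcc : c' = c := by simpa using h
            subst hcc
            exact congrArg some (by omega : c'.toNat - 97 = i)
        · rw [if_neg hb]
          constructor
          · intro h
            exact absurd h (by simp)
          · intro h
            have hcc : c' = c := by simpa using h
            subst hcc
            exact absurd ⟨show (97 : Nat) ≤ c'.toNat by omega,
              show c'.toNat ≤ (122 : Nat) by omega⟩ hb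
      | cons c'' t' => simp [letterIdx, hk]
  rw [Bool.eq_iff_iff, beq_iff_eq, beq_iff_eq]
  exact hiff

-- ===== VERDICT (by name: the statement is the Claim_ definition above) =====
theorem DicoToList_bis_spec : Claim_equal_DicoToList_bis := by
  intro dico _ hnd
  unfold Spec_DicoToList_bis
  rw [pv_A_eq dico hnd, pv_B_eq dico]
  have hL : "abcdefghijklmnopqrstuvwxyz".toList.map (fun c => String.ofList [c])
      = pvPairs.map (fun p => String.ofList [p.2]) := by decide
  have hR : List.range 26 = pvPairs.map Prod.fst := by decide
  have hfacts : ∀ p ∈ pvPairs, p.2.toNat = 97 + p.1 ∧ p.1 < 26 := by decide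
  rw [hL, hR, List.flatMap_map, List.flatMap_map]
  apply List.flatMap_congr
  intro p hp
  obtain ⟨hc, hi⟩ := hfacts p hp
  unfold pvOptval
  rw [pv_pred_eq p.1 p.2 hc hi,
      pv_find?_reverse dico _ (pv_filter_key_le_one dico _ hnd)]
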